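-- pv_equiv track=rewrite | github.com/asem-ai/labs_1 | lab1/1.py | invert_dict_strict
-- ===== SOURCE A (Python) =====
-- def invert_dict_strict(d):
--     value_count = {}
--     for key, value in d.items():
--         if value in value_count:
--             value_count[value] += 1
--         else:
--             value_count[value] = 1
--     result = {}
--     for key, value in d.items():
--         if value_count[value] == 1:
--             result[value] = key
--     return result
-- ===== SOURCE B (Python) =====
-- def invert_dict_strict(d):
--     result = {}
--     dups = set()
--     for key, value in d.items():
--         if value in dups:
--             continue
--         if value in result:
--             del result[value]
--             dups.add(value)
--         else:
--             result[value] = key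
--     return result
-- ===== Notes on version B (the rewrite author's own statement) =====
-- stated objective: alternative
-- what changed: Replaces A's two passes (count all values, then filter by count==1) with a single pass maintaining the result dict and a set of values known to repeat, deleting an entry when its value collides.
import Mathlib
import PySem

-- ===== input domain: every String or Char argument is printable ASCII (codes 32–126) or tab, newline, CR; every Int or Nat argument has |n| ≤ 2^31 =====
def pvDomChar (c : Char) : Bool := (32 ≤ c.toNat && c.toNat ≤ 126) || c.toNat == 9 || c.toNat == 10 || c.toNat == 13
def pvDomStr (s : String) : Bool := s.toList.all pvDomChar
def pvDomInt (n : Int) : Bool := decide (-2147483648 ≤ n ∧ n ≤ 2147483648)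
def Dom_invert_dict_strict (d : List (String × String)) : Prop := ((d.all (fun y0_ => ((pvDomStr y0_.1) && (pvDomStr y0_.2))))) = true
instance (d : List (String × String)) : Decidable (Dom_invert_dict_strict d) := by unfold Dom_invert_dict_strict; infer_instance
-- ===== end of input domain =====

-- B replaces A's two passes (count every value, then keep the count-1 ones) by a single pass that
-- deletes an entry on value collision and remembers repeated values in a set; return value only.

-- ===== PORT A =====
-- first loop of A: build value_count (`value_count[value] += 1` runs only when the key is present, so getD is exact there)
def pvCountA (d : List (String × String)) : PySem.Dict String Int :=
  d.foldl (fun vc kv =>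
    if vc.contains kv.2 then vc.insert kv.2 (vc.getD kv.2 0 + 1)
    else vc.insert kv.2 1) PySem.Dict.empty

-- second loop: `value_count[value]` — the key is always present (counted from the same list), so getD is exact
def invert_dict_strict (d : List (String × String)) : List (String × String) :=
  let vc := pvCountA d
  (d.foldl (fun res kv =>
      if vc.getD kv.2 0 == 1 then res.insert kv.2 kv.1 else res) PySem.Dict.empty).items

-- ===== PORT B =====
def invert_dict_strict_alt (d : List (String × String)) : List (String × String) :=
  (d.foldl (fun (st : PySem.Dict String String × PySem.Set String) kv =>
      if PySem.Set.contains st.2 kv.2 then st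
      else if st.1.contains kv.2 then (st.1.erase kv.2, PySem.Set.add st.2 kv.2)
      else (st.1.insert kv.2 kv.1, st.2))
    (PySem.Dict.empty, PySem.Set.empty)).1.items

-- ===== PRECONDITION & SPEC =====
def Spec_invert_dict_strict (d : List (String × String)) (out : List (String × String)) : Prop := out = invert_dict_strict_alt d
instance (d : List (String × String)) (out : List (String × String)) : Decidable (Spec_invert_dict_strict d out) := by unfold Spec_invert_dict_strict; infer_instance

-- ===== CLAIM (what is proved, stated in full; the proofs are below) =====
def Claim_equal_invert_dict_strict : Prop := ∀ (d : List (String × String)), Dom_invert_dict_strict d → Spec_invert_dict_strict d (invert_dict_strict d)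

-- ===== LEMMAS AND PROOFS =====

/-- number of occurrences of `v` among the values of `q` -/
def cntv (q : List (String × String)) (v : String) : Nat := (q.map Prod.snd).count v

/-- the common characterisation of the result: one value-keyed entry per pair whose value occurs exactly once (per `c`) -/
def resOf (c : String → Nat) (q : List (String × String)) : List (String × String) :=
  q.filterMap (fun kv => if c kv.2 = 1 then some (kv.2, kv.1) else none)

theorem cntv_append (p q : List (String × String)) (v : String) :
    cntv (p ++ q) v = cntv p v + cntv q v := by
  simp [cntv, List.count_append]

theorem cntv_singleton (kv : String × String) (v : String) :
    cntv [kv] v = if v = kv.2 then 1 else 0 := by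
  by_cases h : v = kv.2
  · simp [cntv, List.count_cons, List.count_nil, h]
  · simp [cntv, List.count_cons, List.count_nil, h, Ne.symm h]

theorem contains_mk (l : List (String × String)) (k : String) :
    (PySem.Dict.mk l).contains k = decide (k ∈ l.map Prod.fst) := by
  simp [PySem.Dict.contains_eq_decide_mem_keys, PySem.Dict.keys]

theorem setContains_eq (s : PySem.Set String) (v : String) :
    PySem.Set.contains s v = decide (v ∈ s) := by
  simp [PySem.Set.contains]

theorem mem_set_add (s : PySem.Set String) (x v : String) :
    v ∈ PySem.Set.add s x ↔ v ∈ s ∨ v = x := by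
  unfold PySem.Set.add
  split_ifs with h
  · constructor
    · exact Or.inl
    · rintro (hv | rfl)
      · exact hv
      · simpa [setContains_eq] using h
  · simp [List.mem_append]

theorem mem_resOf_fst (c : String → Nat) (q : List (String × String)) (v : String) :
    v ∈ (resOf c q).map Prod.fst ↔ (∃ kv ∈ q, kv.2 = v) ∧ c v = 1 := by
  constructor
  · intro h
    obtain ⟨pr, hpr, hfst⟩ := List.mem_map.1 h
    obtain ⟨kv, hkv, hf⟩ := List.mem_filterMap.1 hpr
    by_cases hc : c kv.2 = 1
    · rw [if_pos hc] at hf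
      obtain rfl := Option.some.inj hf
      exact ⟨⟨kv, hkv, hfst⟩, hfst ▸ hc⟩
    · rw [if_neg hc] at hf
      exact absurd hf (Option.some_ne_none _).symm
  · rintro ⟨⟨kv, hkv, hv⟩, hc⟩
    refine List.mem_map.2 ⟨(kv.2, kv.1), List.mem_filterMap.2 ⟨kv, hkv, ?_⟩, hv⟩
    simp [hv, hc]

theorem two_occ (p l : List (String × String)) (kv : String × String) (q : String × String)
    (hq : q ∈ p) (hkv : kv ∈ l) (hv : q.2 = kv.2) : 2 ≤ cntv (p ++ l) kv.2 := by
  rw [cntv_append]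
  have h1 : 1 ≤ cntv p kv.2 := by
    have : kv.2 ∈ p.map Prod.snd := List.mem_map.2 ⟨q, hq, hv⟩
    simpa [cntv] using List.count_pos_iff.2 this
  have h2 : 1 ≤ cntv l kv.2 := by
    have : kv.2 ∈ l.map Prod.snd := List.mem_map.2 ⟨kv, hkv, rfl⟩
    simpa [cntv] using List.count_pos_iff.2 this
  omega

-- ===== A-side =====

theorem resOf_append_singleton (c : String → Nat) (p : List (String × String)) (kv : String × String) :
    resOf c (p ++ [kv]) = resOf c p ++ (if c kv.2 = 1 then [(kv.2, kv.1)] else []) := by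
  unfold resOf
  rw [List.filterMap_append]
  congr 1
  by_cases h : c kv.2 = 1 <;> simp [h]

theorem resOf_congr (f g : String → Nat) (p : List (String × String))
    (h : ∀ q ∈ p, (f q.2 = 1 ↔ g q.2 = 1)) : resOf f p = resOf g p := by
  unfold resOf
  apply List.filterMap_congr
  intro a ha
  by_cases hf : f a.2 = 1
  · rw [if_pos hf, if_pos ((h a ha).1 hf)]
  · rw [if_neg hf, if_neg (fun hg => hf ((h a ha).2 hg))]

theorem vc_getD (l : List (String × String)) (acc : PySem.Dict String Int) (v : String) :
    (l.foldl (fun vc kv =>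
        if vc.contains kv.2 then vc.insert kv.2 (vc.getD kv.2 0 + 1)
        else vc.insert kv.2 1) acc).getD v 0 = acc.getD v 0 + (cntv l v : Int) := by
  induction l generalizing acc with
  | nil => simp [cntv]
  | cons kv t ih =>
    rw [List.foldl_cons, ih]
    have hc : cntv (kv :: t) v = (if v = kv.2 then 1 else 0) + cntv t v := by
      have h := cntv_append [kv] t v
      simp only [List.singleton_append] at h
      rw [h, cntv_singleton]
    split_ifs with hcon
    · rw [PySem.Dict.getD_insert, hc]
      by_cases h : v = kv.2
      · subst h
        rw [if_pos rfl, if_pos rfl]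
        push_cast
        omega
      · rw [if_neg h, if_neg h]
        push_cast
        omega
    · have hg : acc.getD kv.2 0 = 0 :=
        PySem.Dict.getD_of_not_contains acc 0 (by simpa using hcon)
      rw [PySem.Dict.getD_insert, hc]
      by_cases h : v = kv.2
      · subst h
        rw [if_pos rfl, if_pos rfl, hg]
        push_cast
        omega
      · rw [if_neg h, if_neg h]
        push_cast
        omega

theorem pvCountA_getD (d : List (String × String)) (v : String) :
    (pvCountA d).getD v 0 = (cntv d v : Int) := by
  unfold pvCountA
  rw [vc_getD]
  simp

theorem A_loop (d : List (String × String)) :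
    ∀ (l p : List (String × String)), p ++ l = d →
    (l.foldl (fun res kv =>
        if ((cntv d kv.2 : Int)) == 1 then res.insert kv.2 kv.1 else res)
      (PySem.Dict.mk (resOf (cntv d) p))).items = resOf (cntv d) d := by
  intro l
  induction l with
  | nil =>
    intro p hp
    show resOf (cntv d) p = resOf (cntv d) d
    rw [← hp, List.append_nil]
  | cons kv t ih =>
    intro p hp
    rw [List.foldl_cons]
    by_cases hc : cntv d kv.2 = 1
    · have hbt : ((cntv d kv.2 : Int) == 1) = true := by
        rw [beq_iff_eq]; exact_mod_cast hc
      simp only [hbt]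
      rw [if_pos trivial]
      have hnot : (PySem.Dict.mk (resOf (cntv d) p)).contains kv.2 = false := by
        rw [contains_mk]
        simp only [decide_eq_false_iff_not]
        intro hm
        obtain ⟨⟨q, hq, hv⟩, _⟩ := (mem_resOf_fst _ _ _).1 hm
        have h2 := two_occ p (kv :: t) kv q hq (by simp) hv
        rw [hp] at h2
        omega
      have hins : (PySem.Dict.mk (resOf (cntv d) p)).insert kv.2 kv.1
          = PySem.Dict.mk (resOf (cntv d) (p ++ [kv])) := by
        apply PySem.Dict.ext
        rw [PySem.Dict.items_insert_of_not_contains _ kv.1 hnot,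
            resOf_append_singleton, if_pos hc]
      rw [hins]
      exact ih (p ++ [kv]) (by simpa using hp)
    · have hbf : ((cntv d kv.2 : Int) == 1) = false := by
        rw [beq_eq_false_iff_ne]
        exact_mod_cast hc
      simp only [hbf]
      rw [if_neg Bool.false_ne_true]
      have hres : PySem.Dict.mk (resOf (cntv d) p)
          = PySem.Dict.mk (resOf (cntv d) (p ++ [kv])) := by
        rw [resOf_append_singleton, if_neg hc, List.append_nil]
      rw [hres]
      exact ih (p ++ [kv]) (by simpa using hp)

-- ===== B-side =====

theorem B_loop :
    ∀ (l p : List (String × String)) (res : PySem.Dict String String) (dups : PySem.Set String),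
    res = PySem.Dict.mk (resOf (cntv p) p) →
    (∀ v, v ∈ dups ↔ 2 ≤ cntv p v) →
    ((l.foldl (fun (st : PySem.Dict String String × PySem.Set String) kv =>
        if PySem.Set.contains st.2 kv.2 then st
        else if st.1.contains kv.2 then (st.1.erase kv.2, PySem.Set.add st.2 kv.2)
        else (st.1.insert kv.2 kv.1, st.2)) (res, dups)).1).items
      = resOf (cntv (p ++ l)) (p ++ l) := by
  intro l
  induction l with
  | nil =>
    intro p res dups hres _
    simp [hres]
  | cons kv t ih =>
    intro p res dups hres hdups
    rw [List.foldl_cons]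
    have hcnt : ∀ v, cntv (p ++ [kv]) v = cntv p v + (if v = kv.2 then 1 else 0) := by
      intro v
      rw [cntv_append, cntv_singleton]
    have hconres : res.contains kv.2 = decide (cntv p kv.2 = 1) := by
      rw [hres, contains_mk, decide_eq_decide, mem_resOf_fst]
      constructor
      · exact fun h => h.2
      · intro h1
        have hpos : 0 < (p.map Prod.snd).count kv.2 := by
          unfold cntv at h1
          omega
        obtain ⟨q, hq, hv⟩ := List.mem_map.1 (List.count_pos_iff.1 hpos)
        exact ⟨⟨q, hq, hv⟩, h1⟩
    by_cases hd : kv.2 ∈ dups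
    · -- value already known to repeat: skip, nothing changes
      have hd2 : 2 ≤ cntv p kv.2 := (hdups kv.2).1 hd
      have hdd : PySem.Set.contains dups kv.2 = true := by
        rw [setContains_eq]
        exact decide_eq_true hd
      simp only [hdd]
      rw [if_pos trivial]
      have hres' : res = PySem.Dict.mk (resOf (cntv (p ++ [kv])) (p ++ [kv])) := by
        rw [hres]
        congr 1
        rw [resOf_append_singleton, if_neg (by rw [hcnt, if_pos rfl]; omega), List.append_nil]
        apply resOf_congr
        intro q _
        rw [hcnt]
        by_cases hv : q.2 = kv.2
        · rw [hv, if_pos rfl]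
          constructor <;> intro <;> omega
        · rw [if_neg hv, Nat.add_zero]
      have hdups' : ∀ v, v ∈ dups ↔ 2 ≤ cntv (p ++ [kv]) v := by
        intro v
        rw [hdups v, hcnt]
        by_cases hv : v = kv.2
        · rw [hv, if_pos rfl]
          constructor <;> intro <;> omega
        · rw [if_neg hv, Nat.add_zero]
      have h := ih (p ++ [kv]) _ _ hres' hdups'
      simpa using h
    · have hd2 : ¬ 2 ≤ cntv p kv.2 := fun h => hd ((hdups kv.2).2 h)
      have hdd : PySem.Set.contains dups kv.2 = false := by
        rw [setContains_eq]
        exact decide_eq_false hd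
      simp only [hdd]
      rw [if_neg Bool.false_ne_true]
      by_cases h1 : cntv p kv.2 = 1
      · -- collision: delete the entry, remember the value
        have hb : res.contains kv.2 = true := by
          rw [hconres]
          exact decide_eq_true h1
        simp only [hb]
        rw [if_pos trivial]
        have hc2 : cntv (p ++ [kv]) kv.2 = 2 := by
          rw [hcnt, if_pos rfl]
          omega
        have herase : res.erase kv.2 = PySem.Dict.mk (resOf (cntv (p ++ [kv])) (p ++ [kv])) := by
          rw [hres]
          apply PySem.Dict.ext
          show (resOf (cntv p) p).filter (fun q => !(q.1 == kv.2)) = _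
          rw [resOf_append_singleton, if_neg (by rw [hc2]; omega), List.append_nil]
          show _ = resOf (cntv (p ++ [kv])) p
          conv_lhs => rw [resOf]
          rw [List.filter_filterMap, resOf]
          apply List.filterMap_congr
          intro a ha
          by_cases hav : a.2 = kv.2
          · rw [if_pos (by rw [hav]; exact h1), if_neg (by rw [hav, hc2]; omega)]
            simp [Option.filter, hav]
          · rw [hcnt, if_neg hav, Nat.add_zero]
            by_cases hfa : cntv p a.2 = 1
            · rw [if_pos hfa]
              simp [Option.filter, hav]
            · rw [if_neg hfa]
              rfl
        have hdups' : ∀ v, v ∈ PySem.Set.add dups kv.2 ↔ 2 ≤ cntv (p ++ [kv]) v := by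
          intro v
          rw [mem_set_add, hdups v, hcnt]
          by_cases hv : v = kv.2
          · rw [hv, if_pos rfl]
            simp [h1]
          · rw [if_neg hv, Nat.add_zero]
            constructor
            · rintro (h | h)
              · exact h
              · exact absurd h hv
            · exact Or.inl
        have h := ih (p ++ [kv]) _ _ herase hdups'
        simpa using h
      · -- first occurrence: record it
        have hb : res.contains kv.2 = false := by
          rw [hconres]
          exact decide_eq_false h1
        simp only [hb]
        rw [if_neg Bool.false_ne_true]
        have h0 : cntv p kv.2 = 0 := by omega
        have hc1 : cntv (p ++ [kv]) kv.2 = 1 := by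
          rw [hcnt, if_pos rfl]
          omega
        have hins : res.insert kv.2 kv.1 = PySem.Dict.mk (resOf (cntv (p ++ [kv])) (p ++ [kv])) := by
          have hnot : (PySem.Dict.mk (resOf (cntv p) p)).contains kv.2 = false := by
            rw [← hres]
            exact hb
          rw [hres]
          apply PySem.Dict.ext
          rw [PySem.Dict.items_insert_of_not_contains _ kv.1 hnot,
              resOf_append_singleton, if_pos hc1]
          show resOf (cntv p) p ++ [(kv.2, kv.1)] = resOf (cntv (p ++ [kv])) p ++ [(kv.2, kv.1)]
          congr 1
          apply resOf_congr
          intro a ha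
          rw [hcnt]
          by_cases hav : a.2 = kv.2
          · exfalso
            have hpos : 1 ≤ cntv p kv.2 := by
              have : kv.2 ∈ p.map Prod.snd := List.mem_map.2 ⟨a, ha, hav⟩
              simpa [cntv] using List.count_pos_iff.2 this
            omega
          · rw [if_neg hav, Nat.add_zero]
        have hdups' : ∀ v, v ∈ dups ↔ 2 ≤ cntv (p ++ [kv]) v := by
          intro v
          rw [hdups v, hcnt]
          by_cases hv : v = kv.2
          · rw [hv, if_pos rfl]
            constructor <;> intro <;> omega
          · rw [if_neg hv, Nat.add_zero]
        have h := ih (p ++ [kv]) _ _ hins hdups'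
        simpa using h

-- ===== VERDICT (by name: the statement is the Claim_ definition above) =====
theorem invert_dict_strict_spec : Claim_equal_invert_dict_strict := by
  intro d _
  show invert_dict_strict d = invert_dict_strict_alt d
  simp only [invert_dict_strict, invert_dict_strict_alt]
  have hfold : (fun (res : PySem.Dict String String) (kv : String × String) =>
      if (pvCountA d).getD kv.2 0 == 1 then res.insert kv.2 kv.1 else res)
      = (fun res kv => if ((cntv d kv.2 : Int)) == 1 then res.insert kv.2 kv.1 else res) := by
    funext res kv
    rw [pvCountA_getD]
  rw [hfold]
  have hA := A_loop d d [] (List.nil_append d)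
  have hB := B_loop d [] PySem.Dict.empty PySem.Set.empty rfl (by intro v; simp [cntv])
  simp only [List.nil_append] at hB
  exact hA.trans hB.symm
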